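-- pv_equiv track=rewrite | github.com/jonathan1209-ppap/BOJ | Unrated/29464.py | nth_palindrome
-- ===== SOURCE A (Python) =====
-- def nth_palindrome(N):
--     length = 1
--     while True:
--         count = 9 * 10**((length-1)//2)
--         if N <= count:
--             base = 10**((length-1)//2)
--             num = base + N - 1
--             num_str = str(num)
--             if length % 2:
--                 return int(num_str + num_str[-2::-1])
--             else:
--                 return int(num_str + num_str[::-1])
--         N -= count
--         length += 1
-- ===== SOURCE B (Python) =====
-- def nth_palindrome(N):
--     # loop-free closed form: palindromes with half-width k occupy N+2 in (2*10**k, 2*10**(k+1)],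
--     # so the half-width can be read off the decimal length of M = N + 2 directly.
--     M = N + 2
--     L = len(str(M))
--     k = L - 2 if L >= 2 and M <= 2 * 10 ** (L - 1) else L - 1
--     if M <= 11 * 10 ** k:          # odd-length band
--         num = M - 10 ** k - 1
--         s = str(num)
--         return int(s + s[-2::-1])
--     else:                          # even-length band
--         num = M - 10 ** (k + 1) - 1
--         s = str(num)
--         return int(s + s[::-1])
-- ===== Notes on version B (the rewrite author's own statement) =====
-- stated objective: simpler
-- what changed: A's unbounded while-loop that advances a length counter and destructively subtracts the per-length palindrome count from N is replaced by a loop-free closed form: the half-width k is read directly off the decimal length of M = N+2 (palindromes of half-width k occupy exactly M in (2*10^k, 2*10^(k+1)]), the odd/even band is one comparison, and the mirror root is obtained by a single subtraction.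
import Mathlib
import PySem

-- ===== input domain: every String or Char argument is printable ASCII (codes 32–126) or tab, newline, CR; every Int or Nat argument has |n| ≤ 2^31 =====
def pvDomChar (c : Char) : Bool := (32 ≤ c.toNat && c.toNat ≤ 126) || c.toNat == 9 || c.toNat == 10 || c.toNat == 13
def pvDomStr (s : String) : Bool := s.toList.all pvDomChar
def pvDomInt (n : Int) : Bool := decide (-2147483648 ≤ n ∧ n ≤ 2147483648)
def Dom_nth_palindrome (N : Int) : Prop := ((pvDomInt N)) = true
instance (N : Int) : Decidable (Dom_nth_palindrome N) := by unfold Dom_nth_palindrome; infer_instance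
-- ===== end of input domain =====

-- B replaces A's subtract-and-advance loop over palindrome lengths by a loop-free closed form
-- that reads the half-width off the decimal length of N+2 (objective: simpler).

-- ===== PORT A =====
-- A's while-loop: state (N, length), subtracting count = 9*10^((length-1)//2) each iteration.
def nth_palindrome_loopA (N : Int) (length : Nat) : Int :=
  let count : Int := 9 * 10 ^ ((length - 1) / 2)
  if N ≤ count then
    let base : Int := 10 ^ ((length - 1) / 2)
    let num : Int := base + N - 1
    let cs := PySem.Int.toChars num
    if length % 2 = 1 then
      (PySem.Int.ofChars? (cs ++ (PySem.List.slice? cs (some (-2)) none (-1)).getD [])).getD 0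
    else
      (PySem.Int.ofChars? (cs ++ (PySem.List.slice? cs none none (-1)).getD [])).getD 0
  else
    nth_palindrome_loopA (N - count) (length + 1)
termination_by N.toNat
decreasing_by
  have h1 : (1:Int) ≤ 10 ^ ((length - 1) / 2) := one_le_pow₀ (by norm_num)
  simp only [not_le] at *
  omega

def nth_palindrome (N : Int) : Int := nth_palindrome_loopA N 1

-- ===== PORT B =====
-- Loop-free closed form: M = N + 2, L = len(str(M)); the half-width k and the band (odd/even
-- length) follow directly, and num is obtained by subtraction.  Exponents are ported with
-- .toNat, exact here since Python only evaluates them with a nonnegative exponent on the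
-- inputs the claim covers (L ≥ 1).
def nth_palindrome_alt (N : Int) : Int :=
  let M : Int := N + 2
  let L : Int := PySem.Str.len (PySem.Int.toStr M)
  let k : Int := if 2 ≤ L ∧ M ≤ 2 * 10 ^ (L - 1).toNat then L - 2 else L - 1
  if M ≤ 11 * 10 ^ k.toNat then
    let num : Int := M - 10 ^ k.toNat - 1
    let s := PySem.Int.toChars num
    (PySem.Int.ofChars? (s ++ (PySem.List.slice? s (some (-2)) none (-1)).getD [])).getD 0
  else
    let num : Int := M - 10 ^ (k + 1).toNat - 1
    let s := PySem.Int.toChars num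
    (PySem.Int.ofChars? (s ++ (PySem.List.slice? s none none (-1)).getD [])).getD 0

-- ===== PRECONDITION & SPEC =====
-- Python A raises ValueError for N < 0 (num is negative, so int() is applied to a string with
-- an interior '-'); Pre_ admits exactly the inputs on which A returns.
def Pre_nth_palindrome (N : Int) : Prop := 0 ≤ N
instance (N : Int) : Decidable (Pre_nth_palindrome N) := by unfold Pre_nth_palindrome; infer_instance
def pvWitness_nth_palindrome : Int := (12)

def Spec_nth_palindrome (N : Int) (out : Int) : Prop := out = nth_palindrome_alt N
instance (N : Int) (out : Int) : Decidable (Spec_nth_palindrome N out) := by unfold Spec_nth_palindrome; infer_instance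

-- ===== CLAIM (what is proved, stated in full; the proofs are below) =====
def Claim_equal_nth_palindrome : Prop := ∀ (N : Int), Dom_nth_palindrome N → Pre_nth_palindrome N → Spec_nth_palindrome N (nth_palindrome N)

-- ===== LEMMAS AND PROOFS =====

theorem pv_one_le_pow (k : Nat) : (1:Int) ≤ 10 ^ k := one_le_pow₀ (by norm_num)

-- minimal half-width: smallest k with N ≤ 2*(10^(k+1)-1) (proof-side characterisation of A's loop)
def pvK (N : Int) (k : Nat) : Nat :=
  if N ≤ 2 * (10 ^ (k + 1) - 1) then k else pvK N (k + 1)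
termination_by N.toNat + 1 - 10 ^ k
decreasing_by
  rename_i h
  simp only [not_le] at h
  have h2 : ((10 ^ (k + 1) : Nat) : Int) ≤ N := by
    push_cast
    have : (2:Int) ≤ 10 ^ (k + 1) := by
      calc (2:Int) ≤ 10 := by norm_num
      _ = 10 ^ 1 := by ring
      _ ≤ 10 ^ (k + 1) := pow_le_pow_right₀ (by norm_num) (by omega)
    omega
  have h3 : (10:Nat) ^ k < 10 ^ (k + 1) := Nat.pow_lt_pow_right (by norm_num) (Nat.lt_succ_self k)
  have h4 : (10:Nat) ^ (k + 1) ≤ N.toNat := by omega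
  omega

-- two steps of A's loop (odd length then even length at half-width k) subtract 18*10^k together
theorem loopA_two_steps (k : Nat) (r : Int) (h : 18 * 10 ^ k < r) :
    nth_palindrome_loopA r (2 * k + 1) = nth_palindrome_loopA (r - 18 * 10 ^ k) (2 * k + 3) := by
  have hk1 : (2 * k + 1 - 1) / 2 = k := by omega
  have hk2 : (2 * k + 2 - 1) / 2 = k := by omega
  have hp := pv_one_le_pow k
  rw [nth_palindrome_loopA]
  simp only [hk1]
  rw [if_neg (by nlinarith)]
  rw [nth_palindrome_loopA]
  simp only [hk2]
  rw [if_neg (by nlinarith)]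
  congr 1
  ring

theorem loopA_chain (d : Nat) : ∀ (j : Nat) (N : Int),
    (∀ i, j ≤ i → i < j + d → 2 * (10 ^ (i + 1) - 1) < N) →
    nth_palindrome_loopA (N - 2 * (10 ^ j - 1)) (2 * j + 1)
      = nth_palindrome_loopA (N - 2 * (10 ^ (j + d) - 1)) (2 * (j + d) + 1) := by
  induction d with
  | zero => intro j N _; rfl
  | succ d ih =>
    intro j N h
    have hj := h j le_rfl (by omega)
    have hpow : (10:Int) ^ (j + 1) = 10 * 10 ^ j := by ring
    have hstep : 18 * 10 ^ j < N - 2 * (10 ^ j - 1) := by rw [hpow] at hj; linarith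
    rw [loopA_two_steps j _ hstep]
    have harg : N - 2 * (10 ^ j - 1) - 18 * 10 ^ j = N - 2 * (10 ^ (j + 1) - 1) := by
      rw [hpow]; ring
    have hlen : 2 * j + 3 = 2 * (j + 1) + 1 := by omega
    rw [harg, hlen]
    have hidx : j + 1 + d = j + (d + 1) := by omega
    have := ih (j + 1) N (fun i hi1 hi2 => h i (by omega) (by omega))
    rw [this, hidx]

theorem pvK_le (N : Int) (j : Nat) : N ≤ 2 * (10 ^ (pvK N j + 1) - 1) := by
  induction j using pvK.induct (N := N) with
  | case1 k h => rw [pvK, if_pos h]; exact h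
  | case2 k h ih => rw [pvK, if_neg h]; exact ih

theorem pvK_lt (N : Int) (j : Nat) :
    ∀ i, j ≤ i → i < pvK N j → 2 * (10 ^ (i + 1) - 1) < N := by
  induction j using pvK.induct (N := N) with
  | case1 k h =>
    intro i hi1 hi2
    rw [pvK, if_pos h] at hi2; omega
  | case2 k h ih =>
    intro i hi1 hi2
    rw [pvK, if_neg h] at hi2
    rcases Nat.eq_or_lt_of_le hi1 with rfl | hlt
    · simpa using not_le.mp h
    · exact ih i hlt hi2

-- number of decimal digits of a natural number
def digcount (n : Nat) : Nat :=
  if n < 10 then 1 else digcount (n / 10) + 1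
termination_by n
decreasing_by exact Nat.div_lt_self (by omega) (by omega)

theorem digcount_pos (n : Nat) : 1 ≤ digcount n := by
  rw [digcount]; split <;> omega

theorem digcount_bounds (n : Nat) : n < 10 ^ digcount n ∧ (1 ≤ n → 10 ^ (digcount n - 1) ≤ n) := by
  induction n using digcount.induct with
  | case1 n h => rw [digcount, if_pos h]; simp; omega
  | case2 n h ih =>
    rw [digcount, if_neg h]
    have hp := digcount_pos (n / 10)
    constructor
    · have := ih.1
      have : n / 10 ≤ 10 ^ digcount (n / 10) - 1 := by omega
      have h2 : n < 10 * (n / 10) + 10 := by omega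
      calc n < 10 * (n / 10) + 10 := h2
        _ ≤ 10 * (10 ^ digcount (n / 10) - 1) + 10 := by omega
        _ = 10 ^ (digcount (n / 10) + 1) := by
            rw [pow_succ]
            have := Nat.one_le_two_pow (n := 0)
            have : 1 ≤ 10 ^ digcount (n / 10) := Nat.one_le_pow _ _ (by omega)
            ring_nf
            omega
    · intro _
      have h1 : 1 ≤ n / 10 := by omega
      have := ih.2 h1
      have hs : digcount (n / 10) + 1 - 1 = digcount (n / 10) - 1 + 1 := by omega
      rw [hs, pow_succ]
      have : 10 ^ (digcount (n / 10) - 1) * 10 ≤ (n / 10) * 10 := by omega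
      omega

theorem toDigitsCore_len : ∀ (n : Nat), ∀ (f : Nat) (acc : List Char), n < f →
    (Nat.toDigitsCore 10 f n acc).length = digcount n + acc.length := by
  intro n
  induction n using Nat.strong_induction_on with
  | _ n ih =>
    intro f acc hf
    match f with
    | 0 => omega
    | f + 1 =>
      rw [Nat.toDigitsCore]
      by_cases h0 : n / 10 = 0
      · rw [if_pos h0]
        have h9 : n < 10 := by omega
        rw [digcount, if_pos h9]
        simp
        omega
      · rw [if_neg h0]
        have hn10 : 10 ≤ n := by
          rcases Nat.lt_or_ge n 10 with h | h
          · exact absurd (Nat.div_eq_of_lt h) h0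
          · exact h
        have hlt : n / 10 < n := Nat.div_lt_self (by omega) (by omega)
        rw [ih (n / 10) hlt f _ (by omega)]
        have hdn : digcount n = digcount (n / 10) + 1 := by
          rw [digcount]
          rw [if_neg (by omega)]
        rw [hdn]
        simp
        omega

theorem toChars_length (m : Int) (h : 0 ≤ m) :
    (PySem.Int.toChars m).length = digcount m.toNat := by
  rw [PySem.Int.toChars, if_neg (by omega)]
  rw [Nat.toDigits]
  rw [toDigitsCore_len m.toNat (m.toNat + 1) [] (by omega)]
  simp

-- cast form of the digit-count bounds, for M ≥ 1
theorem digcount_bounds_int (M : Int) (h : 1 ≤ M) :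
    (10:Int) ^ (digcount M.toNat - 1) ≤ M ∧ M < 10 ^ digcount M.toNat := by
  have h1 := (digcount_bounds M.toNat).1
  have h2 := (digcount_bounds M.toNat).2 (by omega)
  constructor
  · calc ((10:Int)) ^ (digcount M.toNat - 1) = ((10 ^ (digcount M.toNat - 1) : Nat) : Int) := by push_cast; ring
      _ ≤ (M.toNat : Int) := by exact_mod_cast h2
      _ = M := by omega
  · calc M = ((M.toNat : Nat) : Int) := by omega
      _ < ((10 ^ digcount M.toNat : Nat) : Int) := by exact_mod_cast h1
      _ = 10 ^ digcount M.toNat := by push_cast; ring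

theorem pow_le_pow_int (a b : Nat) (h : a ≤ b) : (10:Int) ^ a ≤ 10 ^ b :=
  pow_le_pow_right₀ (by norm_num) h

-- ===== VERDICT (by name: the statement is the Claim_ definition above) =====
theorem nth_palindrome_spec : Claim_equal_nth_palindrome := by
  intro N _ hN
  have hN0 : (0:Int) ≤ N := hN
  unfold Spec_nth_palindrome nth_palindrome nth_palindrome_alt
  simp only []
  set M : Int := N + 2 with hM
  have hM1 : (1:Int) ≤ M := by omega
  set K := pvK N 0 with hK
  have hle : N ≤ 2 * (10 ^ (K + 1) - 1) := pvK_le N 0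
  set D := digcount M.toNat with hD
  have hDpos : 1 ≤ D := digcount_pos _
  have hLen : PySem.Str.len (PySem.Int.toStr M) = (D : Int) := by
    rw [PySem.Str.len_eq, PySem.Int.toList_toStr, toChars_length M (by omega), hD]
  have hBnd := digcount_bounds_int M hM1
  rw [← hD] at hBnd
  rw [hLen]
  -- A side: step the loop to the minimal half-width K
  have hchain := loopA_chain K 0 N (fun i hi1 hi2 => pvK_lt N 0 i hi1 (by omega))
  simp only [pow_zero, zero_add] at hchain
  have h00 : N - 2 * ((1:Int) - 1) = N := by ring
  rw [h00] at hchain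
  rw [hchain]
  have hkd : (2 * K + 1 - 1) / 2 = K := by omega
  have hkd2 : (2 * K + 2 - 1) / 2 = K := by omega
  -- the B-side half-width equals K
  have hmin : ∀ k : Nat, N ≤ 2 * (10 ^ (k + 1) - 1) → K ≤ k := by
    intro k hk
    by_contra hc
    have := pvK_lt N 0 k (by omega) (by omega)
    omega
  have hmono : ∀ a b : Nat, a ≤ b → N ≤ 2 * (10 ^ (a + 1) - 1) → N ≤ 2 * (10 ^ (b + 1) - 1) := by
    intro a b hab ha
    have := pow_le_pow_int (a + 1) (b + 1) (by omega)
    omega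
  have hKeq : (if 2 ≤ (D:Int) ∧ M ≤ 2 * 10 ^ (((D:Int)) - 1).toNat then ((D:Int)) - 2 else ((D:Int)) - 1) = (K : Int) := by
    by_cases hcond : 2 ≤ (D:Int) ∧ M ≤ 2 * 10 ^ (((D:Int)) - 1).toNat
    · rw [if_pos hcond]
      have hD2 : 2 ≤ D := by exact_mod_cast hcond.1
      have htn : (((D:Int)) - 1).toNat = D - 1 := by omega
      have hcm : M ≤ 2 * 10 ^ (D - 1) := by rw [← htn]; exact hcond.2
      have hprop : N ≤ 2 * (10 ^ (D - 2 + 1) - 1) := by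
        have he : D - 2 + 1 = D - 1 := by omega
        rw [he]; omega
      have hup : K ≤ D - 2 := hmin _ hprop
      have hlow : D - 2 ≤ K := by
        by_contra hc
        have hKle : K + 1 ≤ D - 2 := by omega
        have hm1 := hmono K (D - 3) (by omega) hle
        have hq : (10:Int) ^ (D - 1) = 10 * 10 ^ (D - 2) := by
          rw [← pow_succ']
          congr 1
          omega
        have hge : (10:Int) ^ (D - 1) ≤ M := hBnd.1
        have hp := pv_one_le_pow (D - 2)
        have h6 : D - 3 + 1 = D - 2 := by omega
        rw [h6] at hm1
        omega
      omega
    · rw [if_neg hcond]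
      have hP := pv_one_le_pow D
      have hprop : N ≤ 2 * (10 ^ (D - 1 + 1) - 1) := by
        have hd : D - 1 + 1 = D := by omega
        rw [hd]
        have := hBnd.2
        omega
      have hup : K ≤ D - 1 := hmin _ hprop
      have hlow : D - 1 ≤ K := by
        rcases Nat.lt_or_ge D 2 with hD1 | hD2
        · omega
        · have htn : (((D:Int)) - 1).toNat = D - 1 := by omega
          have hnle : ¬ M ≤ 2 * 10 ^ (D - 1) := by
            intro hcc
            exact hcond ⟨by exact_mod_cast hD2, by rw [htn]; exact hcc⟩
          by_contra hc
          have hm1 := hmono K (D - 2) (by omega) hle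
          have h6 : D - 2 + 1 = D - 1 := by omega
          rw [h6] at hm1
          omega
      omega
  rw [hKeq]
  have hkt : ((K:Int)).toNat = K := by omega
  have hkt1 : ((K:Int) + 1).toNat = K + 1 := by omega
  rw [hkt, hkt1]
  -- band test and root agree
  set X : Int := 10 ^ K with hX
  have hXpos := pv_one_le_pow K
  have hpow : (10:Int) ^ (K + 1) = 10 * X := by rw [hX, pow_succ]; ring
  set r : Int := N - 2 * (X - 1) with hr
  by_cases hband : r ≤ 9 * X
  · rw [nth_palindrome_loopA]
    simp only [hkd]
    rw [if_pos hband, if_pos (by omega : (2 * K + 1) % 2 = 1)]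
    rw [if_pos (by omega : M ≤ 11 * X)]
    have hnum : X + r - 1 = M - X - 1 := by omega
    rw [hnum]
  · rw [nth_palindrome_loopA]
    simp only [hkd]
    rw [if_neg hband]
    have h21 : 2 * K + 1 + 1 = 2 * K + 2 := by omega
    rw [h21, nth_palindrome_loopA]
    simp only [hkd2]
    rw [← hX]
    have hub : r - 9 * X ≤ 9 * X := by
      rw [hpow] at hle
      omega
    rw [if_pos hub, if_neg (by omega : ¬ (2 * K + 2) % 2 = 1)]
    rw [if_neg (by omega : ¬ M ≤ 11 * X), hpow]
    have hnum : X + (r - 9 * X) - 1 = M - 10 * X - 1 := by omega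
    rw [hnum]
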